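-- pv_equiv track=rewrite | github.com/JaspervB-tud/AmpliDiff | Scripts.py | move_window_exp
-- ===== SOURCE A (Python) =====
-- def move_window_exp(seq1, seq2, diffs, prev_amplicon, next_amplicon, comparison_matrix):
--     if prev_amplicon[1] > next_amplicon[0]:
--         if len(diffs) > 0:
--             while diffs[0] < next_amplicon[0]:
--                 diffs.pop(0)
--                 if len(diffs) == 0:
--                     break
--         for i in range(prev_amplicon[1], next_amplicon[1]):
--             if not comparison_matrix[(seq1[i], seq2[i])][0]:
--                 diffs.append(i)
--     else:
--         diffs = []
--         for i in range(next_amplicon[0], next_amplicon[1]):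
--             if not comparison_matrix[(seq1[i], seq2[i])][0]:
--                 diffs.append(i)
--     return diffs
-- ===== SOURCE B (Python) =====
-- def move_window_exp(seq1, seq2, diffs, prev_amplicon, next_amplicon, comparison_matrix):
--     # Return-value equivalent to A; unlike A it never mutates `diffs` in place.
--     n0, n1 = next_amplicon[0], next_amplicon[1]
--     overlap = prev_amplicon[1] > n0
--     start = prev_amplicon[1] if overlap else n0
--     # scan the window BACKWARD, collecting mismatch positions, then reverse once
--     res = []
--     for i in range(n1 - 1, start - 1, -1):
--         if not comparison_matrix[(seq1[i], seq2[i])][0]: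
--             res.append(i)
--     res.reverse()
--     if not overlap:
--         return res
--     # count the stale prefix (< n0) and cut it with one slice instead of repeated pop(0)
--     cut = 0
--     for v in diffs:
--         if v >= n0:
--             break
--         cut += 1
--     return diffs[cut:] + res
-- ===== Notes on version B (the rewrite author's own statement) =====
-- stated objective: alternative
-- what changed: A's repeated diffs.pop(0) becomes a count-then-single-slice cut, and A's two forward append loops become one backward window scan collected then reversed and glued after the kept prefix; B does not mutate diffs in place.
import Mathlib
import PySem

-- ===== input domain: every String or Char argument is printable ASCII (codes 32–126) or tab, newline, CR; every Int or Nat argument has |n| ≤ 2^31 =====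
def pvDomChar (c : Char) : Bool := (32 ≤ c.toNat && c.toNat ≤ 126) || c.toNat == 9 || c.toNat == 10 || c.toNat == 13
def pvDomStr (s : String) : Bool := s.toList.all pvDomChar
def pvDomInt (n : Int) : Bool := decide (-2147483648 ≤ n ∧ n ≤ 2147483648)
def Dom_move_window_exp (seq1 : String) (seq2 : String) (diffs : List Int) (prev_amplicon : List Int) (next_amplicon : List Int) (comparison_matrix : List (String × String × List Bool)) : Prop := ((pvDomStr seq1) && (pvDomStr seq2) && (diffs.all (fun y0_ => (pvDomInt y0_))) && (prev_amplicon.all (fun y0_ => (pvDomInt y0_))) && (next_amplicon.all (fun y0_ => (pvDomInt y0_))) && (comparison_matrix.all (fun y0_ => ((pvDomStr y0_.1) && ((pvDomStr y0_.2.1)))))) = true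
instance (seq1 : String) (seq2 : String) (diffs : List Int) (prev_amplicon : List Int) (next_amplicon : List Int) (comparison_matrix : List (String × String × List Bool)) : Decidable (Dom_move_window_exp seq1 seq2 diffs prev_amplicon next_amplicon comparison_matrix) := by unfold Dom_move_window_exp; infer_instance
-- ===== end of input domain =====

-- ===== PORT A =====
-- B cuts the stale prefix by counting it and taking one slice instead of repeated pop(0),
-- and scans the window backward collecting mismatches, reversing once (objective: alternative);
-- A mutates `diffs` in place, B does not — the equivalence proved is about the RETURN value only.

-- A's `not comparison_matrix[(seq1[i], seq2[i])][0]`; `false` (skip) is a placeholder where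
-- Python raises — Pre_ excludes those inputs
def pvNoMatch (seq1 seq2 : String) (cm : List (String × String × List Bool)) (i : Int) : Bool :=
  match PySem.Str.pyGet? seq1 i, PySem.Str.pyGet? seq2 i with
  | some c1, some c2 =>
    match cm.find? (fun e => e.1 == String.ofList [c1] && e.2.1 == String.ofList [c2]) with
    | some e =>
      match e.2.2 with
      | b :: _ => !b
      | [] => false
    | none => false
  | _, _ => false

-- A's `while diffs[0] < next_amplicon[0]: diffs.pop(0)` (with its emptiness guards)
def pvPopLoop (n0 : Int) : List Int → List Int
  | [] => []
  | x :: xs => if x < n0 then pvPopLoop n0 xs else x :: xs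

def move_window_exp (seq1 : String) (seq2 : String) (diffs : List Int) (prev_amplicon : List Int) (next_amplicon : List Int) (comparison_matrix : List (String × String × List Bool)) : List Int :=
  let p1 := (PySem.List.pyGet? prev_amplicon 1).getD 0
  let n0 := (PySem.List.pyGet? next_amplicon 0).getD 0
  let n1 := (PySem.List.pyGet? next_amplicon 1).getD 0
  if p1 > n0 then
    (PySem.List.pyRange p1 n1 1).foldl
      (fun acc i => if pvNoMatch seq1 seq2 comparison_matrix i then acc ++ [i] else acc)
      (pvPopLoop n0 diffs)
  else
    (PySem.List.pyRange n0 n1 1).foldl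
      (fun acc i => if pvNoMatch seq1 seq2 comparison_matrix i then acc ++ [i] else acc)
      []

-- ===== PORT B =====
-- Source B's mismatch test, written as one Option chain (same value as A's helper; proved below)
def pvMismatchAt (seq1 seq2 : String) (cm : List (String × String × List Bool)) (i : Int) : Bool :=
  ((PySem.Str.pyGet? seq1 i).bind (fun c1 =>
    (PySem.Str.pyGet? seq2 i).bind (fun c2 =>
      (cm.find? (fun e => e.1 == String.ofList [c1] && e.2.1 == String.ofList [c2])).bind (fun e =>
        e.2.2.head?.map (fun b => !b))))).getD false

-- Source B's `for v in diffs: if v >= n0: break; cut += 1`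
def pvCut (n0 : Int) : List Int → Nat
  | [] => 0
  | v :: vs => if v ≥ n0 then 0 else pvCut n0 vs + 1

def move_window_exp_alt (seq1 : String) (seq2 : String) (diffs : List Int) (prev_amplicon : List Int) (next_amplicon : List Int) (comparison_matrix : List (String × String × List Bool)) : List Int :=
  let n0 := (PySem.List.pyGet? next_amplicon 0).getD 0
  let n1 := (PySem.List.pyGet? next_amplicon 1).getD 0
  let overlap := decide ((PySem.List.pyGet? prev_amplicon 1).getD 0 > n0)
  let start := if overlap then (PySem.List.pyGet? prev_amplicon 1).getD 0 else n0
  let res := ((PySem.List.pyRange (n1 - 1) (start - 1) (-1)).foldl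
      (fun acc i => if pvMismatchAt seq1 seq2 comparison_matrix i then acc ++ [i] else acc)
      []).reverse
  if !overlap then res
  else diffs.drop (pvCut n0 diffs) ++ res

-- ===== PRECONDITION & SPEC =====
-- index i of the scanned window is valid: both sequence lookups succeed, the matrix has the
-- key and its value list is non-empty (i.e. Python does not raise at i)
def pvOkIdx (seq1 seq2 : String) (cm : List (String × String × List Bool)) (i : Int) : Bool :=
  match PySem.Str.pyGet? seq1 i, PySem.Str.pyGet? seq2 i with
  | some c1, some c2 =>
    match cm.find? (fun e => e.1 == String.ofList [c1] && e.2.1 == String.ofList [c2]) with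
    | some e => !e.2.2.isEmpty
    | none => false
  | _, _ => false

-- the whole scan window [s, n1) is index-valid for both sequences and every index is ok;
-- the empty-or-bounds test comes first so the range is only materialized when it is small
def pvWindowOk (seq1 seq2 : String) (cm : List (String × String × List Bool)) (s n1 : Int) : Bool :=
  decide (n1 ≤ s) ||
  (decide (-(PySem.Str.len seq1) ≤ s) && decide (n1 ≤ PySem.Str.len seq1) &&
   decide (-(PySem.Str.len seq2) ≤ s) && decide (n1 ≤ PySem.Str.len seq2) &&
   (PySem.List.pyRange s n1 1).all (pvOkIdx seq1 seq2 cm))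

-- Pre_ = exactly the inputs on which Python A returns: the two amplicons have an element at
-- index 1 resp. 0 and 1, and every index of the scanned window is valid (no IndexError/KeyError)
def Pre_move_window_exp (seq1 : String) (seq2 : String) (diffs : List Int) (prev_amplicon : List Int) (next_amplicon : List Int) (comparison_matrix : List (String × String × List Bool)) : Prop :=
  2 ≤ prev_amplicon.length ∧ 2 ≤ next_amplicon.length ∧
  pvWindowOk seq1 seq2 comparison_matrix
    (if (PySem.List.pyGet? prev_amplicon 1).getD 0 > (PySem.List.pyGet? next_amplicon 0).getD 0
     then (PySem.List.pyGet? prev_amplicon 1).getD 0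
     else (PySem.List.pyGet? next_amplicon 0).getD 0)
    ((PySem.List.pyGet? next_amplicon 1).getD 0) = true
instance (seq1 : String) (seq2 : String) (diffs : List Int) (prev_amplicon : List Int) (next_amplicon : List Int) (comparison_matrix : List (String × String × List Bool)) : Decidable (Pre_move_window_exp seq1 seq2 diffs prev_amplicon next_amplicon comparison_matrix) := by unfold Pre_move_window_exp; infer_instance

def pvWitness_move_window_exp : String × String × List Int × List Int × List Int × (List (String × String × List Bool)) :=
  ("AC", "AG", [0], [0, 1], [0, 2],
   [("A", "A", [true]), ("C", "G", [false]), ("A", "G", [false]), ("C", "C", [true])])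

def Spec_move_window_exp (seq1 : String) (seq2 : String) (diffs : List Int) (prev_amplicon : List Int) (next_amplicon : List Int) (comparison_matrix : List (String × String × List Bool)) (out : List Int) : Prop := out = move_window_exp_alt seq1 seq2 diffs prev_amplicon next_amplicon comparison_matrix
instance (seq1 : String) (seq2 : String) (diffs : List Int) (prev_amplicon : List Int) (next_amplicon : List Int) (comparison_matrix : List (String × String × List Bool)) (out : List Int) : Decidable (Spec_move_window_exp seq1 seq2 diffs prev_amplicon next_amplicon comparison_matrix out) := by unfold Spec_move_window_exp; infer_instance

-- ===== CLAIM (what is proved, stated in full; the proofs are below) =====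
def Claim_equal_move_window_exp : Prop := ∀ (seq1 : String) (seq2 : String) (diffs : List Int) (prev_amplicon : List Int) (next_amplicon : List Int) (comparison_matrix : List (String × String × List Bool)), Dom_move_window_exp seq1 seq2 diffs prev_amplicon next_amplicon comparison_matrix → Pre_move_window_exp seq1 seq2 diffs prev_amplicon next_amplicon comparison_matrix → Spec_move_window_exp seq1 seq2 diffs prev_amplicon next_amplicon comparison_matrix (move_window_exp seq1 seq2 diffs prev_amplicon next_amplicon comparison_matrix)

-- ===== LEMMAS AND PROOFS =====
theorem pvMismatchAt_eq_pvNoMatch (seq1 seq2 : String) (cm : List (String × String × List Bool)) (i : Int) :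
    pvMismatchAt seq1 seq2 cm i = pvNoMatch seq1 seq2 cm i := by
  unfold pvMismatchAt pvNoMatch
  cases PySem.Str.pyGet? seq1 i with
  | none => rfl
  | some c1 =>
    cases PySem.Str.pyGet? seq2 i with
    | none => rfl
    | some c2 =>
      cases hf : cm.find? (fun e => e.1 == String.ofList [c1] && e.2.1 == String.ofList [c2]) with
      | none => simp [hf]
      | some e => cases he : e.2.2 <;> simp [hf, he]

theorem pvPopLoop_eq_drop_cut (n0 : Int) (l : List Int) :
    pvPopLoop n0 l = l.drop (pvCut n0 l) := by
  induction l with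
  | nil => rfl
  | cons x xs ih =>
    by_cases h : x < n0
    · have h' : ¬ x ≥ n0 := by omega
      simp [pvPopLoop, pvCut, h, h', ih]
    · have h' : x ≥ n0 := by omega
      simp [pvPopLoop, pvCut, h, h']

-- the backward filtered range, reversed, is the forward filtered range
theorem pvBackScan (p : Int → Bool) (s n1 : Int) :
    ((PySem.List.pyRange (n1 - 1) (s - 1) (-1)).filter p).reverse
    = (PySem.List.pyRange s n1 1).filter p := by
  rw [PySem.List.pyRange_neg_one_eq_reverse]
  have h1 : s - 1 + 1 = s := by omega
  have h2 : n1 - 1 + 1 = n1 := by omega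
  rw [h1, h2]
  simp [List.filter_reverse]

-- ===== VERDICT (by name: the statement is the Claim_ definition above) =====
theorem move_window_exp_spec : Claim_equal_move_window_exp := by
  intro seq1 seq2 diffs prev_amplicon next_amplicon comparison_matrix _ _
  unfold Spec_move_window_exp move_window_exp move_window_exp_alt
  by_cases h : (PySem.List.pyGet? prev_amplicon 1).getD 0 > (PySem.List.pyGet? next_amplicon 0).getD 0 <;>
    simp [h, funext (pvMismatchAt_eq_pvNoMatch seq1 seq2 comparison_matrix),
      PySem.List.foldl_append_if_eq_filter, pvPopLoop_eq_drop_cut, pvBackScan]
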